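-- pv_equiv track=rewrite | github.com/RafeekNasrallah/SUDOKU | sudo.py | searchblock
-- ===== SOURCE A (Python) =====
-- def searchblock(a, block, num): # take a matrix, a block number and a number, returns whether this numbers exists int his mblock
--     if block == 0:
--         for x in range(0, 3):
--             for y in range(0, 3):
--                 if a[x][y] == num:
--                     return True
--         return False
--     if block == 1:
--         for x in range(0, 3):
--             for y in range(3, 6):
--                 if a[x][y] == num:
--                     return True
--         return False
--     if block == 2:
--         for x in range(0, 3):
--             for y in range(6, 9):
--                 if a[x][y] == num:
--                     return True
--         return False
--     if block == 3:
--         for x in range(3, 6):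
--             for y in range(0, 3):
--                 if a[x][y] == num:
--                     return True
--         return False
--     if block == 4:
--         for x in range(3, 6):
--             for y in range(3, 6):
--                 if a[x][y] == num:
--                     return True
--         return False
--     if block == 5:
--         for x in range(3, 6):
--             for y in range(6, 9):
--                 if a[x][y] == num:
--                     return True
--         return False
--     if block == 6:
--         for x in range(6, 9):
--             for y in range(0, 3):
--                 if a[x][y] == num:
--                     return True
--         return False
--     if block == 7:
--         for x in range(6, 9):
--             for y in range(3, 6):
--                 if a[x][y] == num:
--                     return True
--         return False
--     if block == 8:
--         for x in range(6, 9):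
--             for y in range(6, 9):
--                 if a[x][y] == num:
--                     return True
--         return False
-- ===== SOURCE B (Python) =====
-- def searchblock(a, block, num):
--     if not 0 <= block <= 8:
--         return None
--     for x, row in enumerate(a):
--         for y, v in enumerate(row):
--             if x // 3 == block // 3 and y // 3 == block % 3 and v == num:
--                 return True
--     return False
-- ===== Notes on version B (the rewrite author's own statement) =====
-- stated objective: alternative
-- what changed: Instead of A's nine copy-pasted branches each indexing into its hard-coded 3x3 cell range, B never indexes at all: it enumerates every cell of the matrix once and classifies each cell by its block coordinates (x//3, y//3) against (block//3, block%3), returning True on a matching cell equal to num.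
-- outside the precondition, e.g. on searchblock([[5]], 0, 5): A returns True, B returns True; on searchblock([[1], [1], [1]], 0, 5): A raises IndexError, B returns False
import Mathlib
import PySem

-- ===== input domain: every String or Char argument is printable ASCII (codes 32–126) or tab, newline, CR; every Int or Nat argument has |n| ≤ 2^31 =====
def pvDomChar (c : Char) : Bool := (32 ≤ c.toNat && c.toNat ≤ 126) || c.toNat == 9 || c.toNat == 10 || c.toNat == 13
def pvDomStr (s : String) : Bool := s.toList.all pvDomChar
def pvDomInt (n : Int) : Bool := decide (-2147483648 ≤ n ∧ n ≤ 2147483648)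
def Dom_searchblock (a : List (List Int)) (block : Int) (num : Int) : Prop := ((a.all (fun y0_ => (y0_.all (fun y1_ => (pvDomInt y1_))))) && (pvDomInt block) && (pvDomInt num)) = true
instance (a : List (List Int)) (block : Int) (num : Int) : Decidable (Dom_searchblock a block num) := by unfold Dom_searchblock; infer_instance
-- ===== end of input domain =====

-- B drops A's nine hard-coded indexing branches: it enumerates every cell of the matrix
-- once and classifies each cell by its block coordinates (x//3, y//3) against
-- (block//3, block%3); same return value on the stated precondition.

-- ===== PORT A =====
-- inner 'for y in range(...)' loop of each branch: a[x][y] (none = IndexError), early True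
def sbInner (a : List (List Int)) (x : Int) (ys : List Int) (num : Int) : Option Bool :=
  match ys with
  | [] => some false
  | y :: t =>
    match (PySem.List.pyGet? a x).bind (fun row => PySem.List.pyGet? row y) with
    | none => none
    | some v => if v == num then some true else sbInner a x t num

-- outer 'for x in range(...)' loop of each branch
def sbOuter (a : List (List Int)) (xs ys : List Int) (num : Int) : Option Bool :=
  match xs with
  | [] => some false
  | x :: t =>
    match sbInner a x ys num with
    | none => none
    | some true => some true
    | some false => sbOuter a t ys num

def searchblock (a : List (List Int)) (block : Int) (num : Int) : Option Bool :=
  if block = 0 then sbOuter a (PySem.List.pyRange 0 3 1) (PySem.List.pyRange 0 3 1) num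
  else if block = 1 then sbOuter a (PySem.List.pyRange 0 3 1) (PySem.List.pyRange 3 6 1) num
  else if block = 2 then sbOuter a (PySem.List.pyRange 0 3 1) (PySem.List.pyRange 6 9 1) num
  else if block = 3 then sbOuter a (PySem.List.pyRange 3 6 1) (PySem.List.pyRange 0 3 1) num
  else if block = 4 then sbOuter a (PySem.List.pyRange 3 6 1) (PySem.List.pyRange 3 6 1) num
  else if block = 5 then sbOuter a (PySem.List.pyRange 3 6 1) (PySem.List.pyRange 6 9 1) num
  else if block = 6 then sbOuter a (PySem.List.pyRange 6 9 1) (PySem.List.pyRange 0 3 1) num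
  else if block = 7 then sbOuter a (PySem.List.pyRange 6 9 1) (PySem.List.pyRange 3 6 1) num
  else if block = 8 then sbOuter a (PySem.List.pyRange 6 9 1) (PySem.List.pyRange 6 9 1) num
  else none  -- Python falls through all ifs and returns None

-- ===== PORT B =====
-- inner 'for y, v in enumerate(row)' loop, y carried as a counter; early return True
def sbRow (x y : Nat) (cells : List Int) (block num : Int) : Bool :=
  match cells with
  | [] => false
  | v :: t =>
    if ((x / 3 : Nat) : Int) = PySem.Int.floordiv block 3 ∧
       ((y / 3 : Nat) : Int) = PySem.Int.mod block 3 ∧ v = num then true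
    else sbRow x (y + 1) t block num

-- outer 'for x, row in enumerate(a)' loop, x carried as a counter
def sbMat (x : Nat) (rows : List (List Int)) (block num : Int) : Bool :=
  match rows with
  | [] => false
  | r :: t => if sbRow x 0 r block num then true else sbMat (x + 1) t block num

def searchblock_alt (a : List (List Int)) (block : Int) (num : Int) : Option Bool :=
  if 0 ≤ block ∧ block ≤ 8 then some (sbMat 0 a block num) else none

-- ===== PRECONDITION & SPEC =====
-- Pre_ excludes inputs where A's indexing can raise IndexError: a valid block index 0-8 whose
-- addressed 3x3 block of cells is not fully present in the matrix (on a few of those A still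
-- returns True because its scan finds num before the missing cell — excluded with the rest,
-- since that early exit is an accident of scan order; see cites).
def Pre_searchblock (a : List (List Int)) (block : Int) (num : Int) : Prop :=
  0 ≤ block → block ≤ 8 →
  (block.toNat / 3) * 3 + 3 ≤ a.length ∧
  ∀ row ∈ (a.drop ((block.toNat / 3) * 3)).take 3, (block.toNat % 3) * 3 + 3 ≤ row.length
instance (a : List (List Int)) (block : Int) (num : Int) : Decidable (Pre_searchblock a block num) := by unfold Pre_searchblock; infer_instance
def pvWitness_searchblock : List (List Int) × Int × Int := ([[1,2,3],[4,5,6],[7,8,9]], 0, 5)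

def Spec_searchblock (a : List (List Int)) (block : Int) (num : Int) (out : Option Bool) : Prop := out = searchblock_alt a block num
instance (a : List (List Int)) (block : Int) (num : Int) (out : Option Bool) : Decidable (Spec_searchblock a block num out) := by unfold Spec_searchblock; infer_instance

-- ===== CLAIM (what is proved, stated in full; the proofs are below) =====
def Claim_equal_searchblock : Prop := ∀ (a : List (List Int)) (block : Int) (num : Int), Dom_searchblock a block num → Pre_searchblock a block num → Spec_searchblock a block num (searchblock a block num)

-- ===== LEMMAS AND PROOFS =====

-- the cell read A performs: a[x][y]
def sbGet (a : List (List Int)) (x y : Int) : Option Int :=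
  (PySem.List.pyGet? a x).bind (fun row => PySem.List.pyGet? row y)

theorem sbInner_eq_any (a : List (List Int)) (x num : Int) (ys : List Int)
    (h : ∀ y ∈ ys, (sbGet a x y).isSome) :
    sbInner a x ys num = some (ys.any fun y => sbGet a x y == some num) := by
  induction ys with
  | nil => simp [sbInner]
  | cons y t ih =>
    obtain ⟨v, hv⟩ := Option.isSome_iff_exists.mp (h y (by simp))
    have hb : (PySem.List.pyGet? a x).bind (fun row => PySem.List.pyGet? row y) = some v := hv
    simp only [sbInner, List.any_cons]
    rw [hb, hv]
    by_cases he : v = num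
    · subst he; simp
    · simp [he, ih (fun y hy => h y (by simp [hy]))]

theorem sbOuter_eq_any (a : List (List Int)) (num : Int) (xs ys : List Int)
    (h : ∀ x ∈ xs, ∀ y ∈ ys, (sbGet a x y).isSome) :
    sbOuter a xs ys num = some (xs.any fun x => ys.any fun y => sbGet a x y == some num) := by
  induction xs with
  | nil => simp [sbOuter]
  | cons x t ih =>
    simp only [sbOuter, sbInner_eq_any a x num ys (h x (by simp))]
    cases hb : (ys.any fun y => sbGet a x y == some num) <;>
      simp [hb, ih (fun x hx => h x (by simp [hx]))]

theorem sbRow_eq_true_iff (block num : Int) (cells : List Int) (x y : Nat) :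
    sbRow x y cells block num = true ↔
      ∃ j < cells.length, ((x / 3 : Nat) : Int) = PySem.Int.floordiv block 3 ∧
        (((y + j) / 3 : Nat) : Int) = PySem.Int.mod block 3 ∧ cells[j]! = num := by
  induction cells generalizing y with
  | nil => simp [sbRow]
  | cons v t ih =>
    simp only [sbRow]
    by_cases hc : ((x / 3 : Nat) : Int) = PySem.Int.floordiv block 3 ∧
        ((y / 3 : Nat) : Int) = PySem.Int.mod block 3 ∧ v = num
    · simp only [if_pos hc, true_iff]
      exact ⟨0, by simp, hc.1, by simpa using hc.2.1, by simpa using hc.2.2⟩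
    · rw [if_neg hc]
      rw [ih (y + 1)]
      constructor
      · rintro ⟨j, hj, h1, h2, h3⟩
        exact ⟨j + 1, by simp only [List.length_cons]; omega, h1,
          by rw [show y + (j+1) = y + 1 + j by omega]; exact h2, by simpa using h3⟩
      · rintro ⟨j, hj, h1, h2, h3⟩
        match j with
        | 0 => exact absurd ⟨h1, by simpa using h2, by simpa using h3⟩ hc
        | j + 1 =>
          exact ⟨j, by simp only [List.length_cons] at hj; omega, h1,
            by rw [show y + 1 + j = y + (j+1) by omega]; exact h2, by simpa using h3⟩

theorem sbMat_eq_true_iff (block num : Int) (rows : List (List Int)) (x : Nat) :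
    sbMat x rows block num = true ↔
      ∃ i < rows.length, sbRow (x + i) 0 (rows[i]!) block num = true := by
  induction rows generalizing x with
  | nil => simp [sbMat]
  | cons r t ih =>
    simp only [sbMat]
    by_cases hr : sbRow x 0 r block num = true
    · simp only [if_pos hr, true_iff]
      exact ⟨0, by simp, by simpa using hr⟩
    · rw [if_neg hr, ih (x + 1)]
      constructor
      · rintro ⟨i, hi, h⟩
        exact ⟨i + 1, by simp only [List.length_cons]; omega,
          by rw [show x + (i+1) = x + 1 + i by omega]; simpa using h⟩
      · rintro ⟨i, hi, h⟩
        match i with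
        | 0 => exact absurd (by simpa using h) hr
        | i + 1 =>
          exact ⟨i, by simp only [List.length_cons] at hi; omega,
          by rw [show x + 1 + i = x + (i+1) by omega]; simpa using h⟩

-- the main bridge, for one block with row-block rb and column-block cb
theorem any_eq_sbMat (a : List (List Int)) (block num : Int) (rb cb : Nat)
    (hfd : PySem.Int.floordiv block 3 = (rb : Int))
    (hmd : PySem.Int.mod block 3 = (cb : Int)) :
    ([((3*rb : Nat) : Int), ((3*rb+1 : Nat) : Int), ((3*rb+2 : Nat) : Int)].any fun X =>
      [((3*cb : Nat) : Int), ((3*cb+1 : Nat) : Int), ((3*cb+2 : Nat) : Int)].any fun Y =>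
        sbGet a X Y == some num) = sbMat 0 a block num := by
  rw [Bool.eq_iff_iff, sbMat_eq_true_iff]
  constructor
  · intro h
    simp only [List.any_cons, List.any_nil, Bool.or_false, Bool.or_eq_true, beq_iff_eq] at h
    have key : ∀ (i j : Nat), i / 3 = rb → j / 3 = cb →
        sbGet a (i : Int) (j : Int) = some num →
        ∃ i' < a.length, sbRow (0 + i') 0 (a[i']!) block num = true := by
      intro i j hi3 hj3 hget
      simp only [sbGet, PySem.List.pyGet?_natCast] at hget
      cases hrowq : a[i]? with
      | none => rw [hrowq] at hget; simp at hget
      | some row =>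
        rw [hrowq] at hget
        simp only [Option.bind_some] at hget
        obtain ⟨hi, hrow⟩ := List.getElem?_eq_some_iff.mp hrowq
        obtain ⟨hjl, hcell⟩ := List.getElem?_eq_some_iff.mp hget
        refine ⟨i, hi, ?_⟩
        rw [sbRow_eq_true_iff]
        refine ⟨j, ?_, ?_, ?_, ?_⟩
        · simpa [Nat.zero_add, getElem!_pos a i hi, hrow] using hjl
        · rw [Nat.zero_add, hi3, hfd]
        · rw [Nat.zero_add, hj3, hmd]
        · simp only [getElem!_pos a i hi, hrow]
          rw [getElem!_pos row j hjl, hcell]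
    rcases h with ((h | h | h) | (h | h | h) | (h | h | h))
    · exact key (3*rb) (3*cb) (by omega) (by omega) h
    · exact key (3*rb) (3*cb+1) (by omega) (by omega) h
    · exact key (3*rb) (3*cb+2) (by omega) (by omega) h
    · exact key (3*rb+1) (3*cb) (by omega) (by omega) h
    · exact key (3*rb+1) (3*cb+1) (by omega) (by omega) h
    · exact key (3*rb+1) (3*cb+2) (by omega) (by omega) h
    · exact key (3*rb+2) (3*cb) (by omega) (by omega) h
    · exact key (3*rb+2) (3*cb+1) (by omega) (by omega) h
    · exact key (3*rb+2) (3*cb+2) (by omega) (by omega) h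
  · rintro ⟨i, hi, hrow⟩
    rw [sbRow_eq_true_iff] at hrow
    obtain ⟨j, hj, h1, h2, h3⟩ := hrow
    rw [hfd, Nat.cast_inj] at h1
    rw [hmd, Nat.cast_inj] at h2
    have hjl : j < (a[i]).length := by rwa [getElem!_pos a i hi] at hj
    have hget : sbGet a (i : Int) (j : Int) = some num := by
      simp only [sbGet, PySem.List.pyGet?_natCast, List.getElem?_eq_getElem hi,
        Option.bind_some, List.getElem?_eq_getElem hjl]
      rw [getElem!_pos a i hi, getElem!_pos (a[i]) j hjl] at h3
      rw [h3]
    simp only [List.any_cons, List.any_nil, Bool.or_false, Bool.or_eq_true, beq_iff_eq]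
    have hic : i = 3*rb ∨ i = 3*rb+1 ∨ i = 3*rb+2 := by omega
    have hjc : j = 3*cb ∨ j = 3*cb+1 ∨ j = 3*cb+2 := by omega
    rcases hic with rfl | rfl | rfl <;> rcases hjc with rfl | rfl | rfl <;> tauto

-- rows of the addressed block are long enough ⇒ every cell read is in range
theorem sbGet_isSome_of (a : List (List Int)) (rb cb : Nat)
    (h1 : 3*rb + 3 ≤ a.length)
    (h2 : ∀ row ∈ (a.drop (3*rb)).take 3, 3*cb + 3 ≤ row.length) :
    ∀ X ∈ [((3*rb : Nat) : Int), ((3*rb+1 : Nat) : Int), ((3*rb+2 : Nat) : Int)],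
    ∀ Y ∈ [((3*cb : Nat) : Int), ((3*cb+1 : Nat) : Int), ((3*cb+2 : Nat) : Int)],
      (sbGet a X Y).isSome := by
  have key : ∀ k l : Nat, k < 3 → l < 3 →
      (sbGet a ((3*rb+k : Nat) : Int) ((3*cb+l : Nat) : Int)).isSome := by
    intro k l hk hl
    have hi : 3*rb+k < a.length := by omega
    have hkl : k < ((a.drop (3*rb)).take 3).length := by
      simp only [List.length_take, List.length_drop]; omega
    have hrowmem : a[3*rb+k] ∈ (a.drop (3*rb)).take 3 := by
      have he : ((a.drop (3*rb)).take 3)[k] = a[3*rb+k] := by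
        rw [List.getElem_take, List.getElem_drop]
      rw [← he]; exact List.getElem_mem hkl
    have hj : 3*cb+l < (a[3*rb+k]).length := by
      have := h2 _ hrowmem; omega
    simp only [sbGet, PySem.List.pyGet?_natCast, List.getElem?_eq_getElem hi,
      Option.bind_some, List.getElem?_eq_getElem hj, Option.isSome_some]
  intro X hX Y hY
  simp only [List.mem_cons, List.not_mem_nil, or_false] at hX hY
  rcases hX with rfl | rfl | rfl <;> rcases hY with rfl | rfl | rfl
  · simpa using key 0 0 (by omega) (by omega)
  · simpa using key 0 1 (by omega) (by omega)
  · simpa using key 0 2 (by omega) (by omega)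
  · simpa using key 1 0 (by omega) (by omega)
  · simpa using key 1 1 (by omega) (by omega)
  · simpa using key 1 2 (by omega) (by omega)
  · simpa using key 2 0 (by omega) (by omega)
  · simpa using key 2 1 (by omega) (by omega)
  · simpa using key 2 2 (by omega) (by omega)

-- one valid block, with its 3x3 region present: A's nested scan = some (B's classifying scan)
theorem blockCase (a : List (List Int)) (block num : Int) (rb cb : Nat)
    (hfd : PySem.Int.floordiv block 3 = (rb : Int)) (hmd : PySem.Int.mod block 3 = (cb : Int))
    (h1 : 3*rb + 3 ≤ a.length)
    (h2 : ∀ row ∈ (a.drop (3*rb)).take 3, 3*cb + 3 ≤ row.length) :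
    sbOuter a [((3*rb : Nat) : Int), ((3*rb+1 : Nat) : Int), ((3*rb+2 : Nat) : Int)]
              [((3*cb : Nat) : Int), ((3*cb+1 : Nat) : Int), ((3*cb+2 : Nat) : Int)] num
      = some (sbMat 0 a block num) := by
  rw [sbOuter_eq_any a num _ _ (sbGet_isSome_of a rb cb h1 h2),
    any_eq_sbMat a block num rb cb hfd hmd]

-- ===== VERDICT (by name: the statement is the Claim_ definition above) =====
theorem searchblock_spec : Claim_equal_searchblock := by
  intro a block num _ hpre
  unfold Spec_searchblock
  by_cases hb : 0 ≤ block ∧ block ≤ 8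
  · have h9 : block = 0 ∨ block = 1 ∨ block = 2 ∨ block = 3 ∨ block = 4 ∨ block = 5 ∨
        block = 6 ∨ block = 7 ∨ block = 8 := by omega
    rcases h9 with rfl | rfl | rfl | rfl | rfl | rfl | rfl | rfl | rfl
    · obtain ⟨hp1, hp2⟩ := hpre (by norm_num) (by norm_num)
      have hc := blockCase a 0 num 0 0 (by decide) (by decide) (by norm_num; omega)
        (by intro row hr; have := hp2 row (by simpa using hr); omega)
      norm_num at hc
      simp only [searchblock, searchblock_alt]
      norm_num
      exact hc
    · obtain ⟨hp1, hp2⟩ := hpre (by norm_num) (by norm_num)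
      have hc := blockCase a 1 num 0 1 (by decide) (by decide) (by norm_num; omega)
        (by intro row hr; have := hp2 row (by simpa using hr); omega)
      norm_num at hc
      simp only [searchblock, searchblock_alt]
      norm_num
      exact hc
    · obtain ⟨hp1, hp2⟩ := hpre (by norm_num) (by norm_num)
      have hc := blockCase a 2 num 0 2 (by decide) (by decide) (by norm_num; omega)
        (by intro row hr; have := hp2 row (by simpa using hr); omega)
      norm_num at hc
      simp only [searchblock, searchblock_alt]
      norm_num
      exact hc
    · obtain ⟨hp1, hp2⟩ := hpre (by norm_num) (by norm_num)
      have hc := blockCase a 3 num 1 0 (by decide) (by decide) (by norm_num; omega)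
        (by intro row hr; have := hp2 row (by simpa using hr); omega)
      norm_num at hc
      simp only [searchblock, searchblock_alt]
      norm_num
      exact hc
    · obtain ⟨hp1, hp2⟩ := hpre (by norm_num) (by norm_num)
      have hc := blockCase a 4 num 1 1 (by decide) (by decide) (by norm_num; omega)
        (by intro row hr; have := hp2 row (by simpa using hr); omega)
      norm_num at hc
      simp only [searchblock, searchblock_alt]
      norm_num
      exact hc
    · obtain ⟨hp1, hp2⟩ := hpre (by norm_num) (by norm_num)
      have hc := blockCase a 5 num 1 2 (by decide) (by decide) (by norm_num; omega)
        (by intro row hr; have := hp2 row (by simpa using hr); omega)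
      norm_num at hc
      simp only [searchblock, searchblock_alt]
      norm_num
      exact hc
    · obtain ⟨hp1, hp2⟩ := hpre (by norm_num) (by norm_num)
      have hc := blockCase a 6 num 2 0 (by decide) (by decide) (by norm_num; omega)
        (by intro row hr; have := hp2 row (by simpa using hr); omega)
      norm_num at hc
      simp only [searchblock, searchblock_alt]
      norm_num
      exact hc
    · obtain ⟨hp1, hp2⟩ := hpre (by norm_num) (by norm_num)
      have hc := blockCase a 7 num 2 1 (by decide) (by decide) (by norm_num; omega)
        (by intro row hr; have := hp2 row (by simpa using hr); omega)
      norm_num at hc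
      simp only [searchblock, searchblock_alt]
      norm_num
      exact hc
    · obtain ⟨hp1, hp2⟩ := hpre (by norm_num) (by norm_num)
      have hc := blockCase a 8 num 2 2 (by decide) (by decide) (by norm_num; omega)
        (by intro row hr; have := hp2 row (by simpa using hr); omega)
      norm_num at hc
      simp only [searchblock, searchblock_alt]
      norm_num
      exact hc
  · have h0 : block ≠ 0 := by omega
    have h1 : block ≠ 1 := by omega
    have h2 : block ≠ 2 := by omega
    have h3 : block ≠ 3 := by omega
    have h4 : block ≠ 4 := by omega
    have h5 : block ≠ 5 := by omega
    have h6 : block ≠ 6 := by omega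
    have h7 : block ≠ 7 := by omega
    have h8 : block ≠ 8 := by omega
    simp [searchblock, searchblock_alt, hb, h0, h1, h2, h3, h4, h5, h6, h7, h8]
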